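-- pv_equiv track=rewrite | github.com/Durgaprasad-kakarla/Leetcode | 3068. Find the Maximum Sum of Node Values.py | maximumValueSum
-- ===== SOURCE A (Python) =====
-- from typing import List
--
-- def maximumValueSum(nums: List[int], k: int, edges: List[List[int]]) -> int:
--     n=len(nums)
--     new=[(nums[i]^k)-nums[i] for i in range(n)]
--     new.sort(reverse=True)
--     res=sum(nums)
--     for i in range(0,n,2):
--         if i==n-1:
--             break
--         path=new[i]+new[i+1]
--         if path<=0:
--             break
--         res+=path
--     return res
-- ===== SOURCE B (Python) =====
-- def maximumValueSum(nums, k, edges):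
--     # One pass, no sort: sum positive XOR-deltas; if their count is odd,
--     # adjust by the better of dropping the smallest positive delta or
--     # adding the largest non-positive delta.
--     total = 0
--     sp = 0
--     odd = False
--     mp = None  # smallest positive delta
--     mn = None  # largest non-positive delta
--     for v in nums:
--         total += v
--         d = (v ^ k) - v
--         if d > 0:
--             sp += d
--             odd = not odd
--             if mp is None or d < mp:
--                 mp = d
--         else:
--             if mn is None or d > mn:
--                 mn = d
--     if not odd:
--         return total + sp
--     if mn is not None and mp + mn > 0:
--         return total + sp + mn
--     return total + sp - mp
-- ===== Notes on version B (the rewrite author's own statement) =====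
-- stated objective: faster
-- what changed: Replaces A's sort-then-pair greedy over XOR-deltas by a single unsorted pass that sums positive deltas and tracks the smallest positive and largest non-positive delta, fixing odd parity with the better boundary adjustment.
import Mathlib
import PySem

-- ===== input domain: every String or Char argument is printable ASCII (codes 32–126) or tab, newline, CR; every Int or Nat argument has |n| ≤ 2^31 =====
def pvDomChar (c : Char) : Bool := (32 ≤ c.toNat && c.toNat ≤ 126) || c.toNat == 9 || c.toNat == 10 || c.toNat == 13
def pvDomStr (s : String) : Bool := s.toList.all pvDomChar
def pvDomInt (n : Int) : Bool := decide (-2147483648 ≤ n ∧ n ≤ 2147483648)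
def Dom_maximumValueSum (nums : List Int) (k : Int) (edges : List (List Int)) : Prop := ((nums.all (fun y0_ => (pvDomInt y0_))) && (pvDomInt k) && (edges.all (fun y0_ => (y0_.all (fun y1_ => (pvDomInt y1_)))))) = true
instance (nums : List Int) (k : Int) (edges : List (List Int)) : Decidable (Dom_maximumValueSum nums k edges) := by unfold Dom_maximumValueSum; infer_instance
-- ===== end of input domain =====

-- B replaces A's sort-and-pair greedy by a single pass (sum of positive XOR-deltas,
-- adjusted at odd parity by the best boundary delta); objective: faster (O(n) vs O(n log n)).

-- ===== PORT A =====
-- the `for i in range(0,n,2)` pairing loop with its two breaks, over the sorted delta list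
def pvLoopA : List Int → Int
  | [] => 0
  | [_] => 0                                   -- i == n-1: break
  | x :: y :: rest => if x + y ≤ 0 then 0 else x + y + pvLoopA rest

def maximumValueSum (nums : List Int) (k : Int) (edges : List (List Int)) : Int :=
  let new := nums.map (fun v => PySem.Int.bxor v k - v)
  let newS := PySem.List.sorted new (fun x => x) true
  nums.sum + pvLoopA newS

-- ===== PORT B =====
structure PvSt where
  total : Int
  sp : Int
  odd : Bool
  mp : Option Int
  mn : Option Int
  deriving Repr, DecidableEq

def pvStep (k : Int) (s : PvSt) (v : Int) : PvSt :=
  let d := PySem.Int.bxor v k - v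
  if 0 < d then
    { total := s.total + v, sp := s.sp + d, odd := !s.odd,
      mp := match s.mp with
            | none => some d
            | some m => if d < m then some d else some m,
      mn := s.mn }
  else
    { total := s.total + v, sp := s.sp, odd := s.odd, mp := s.mp,
      mn := match s.mn with
            | none => some d
            | some m => if d > m then some d else some m }

def maximumValueSum_alt (nums : List Int) (k : Int) (edges : List (List Int)) : Int :=
  let s := nums.foldl (pvStep k) ⟨0, 0, false, none, none⟩
  if s.odd = false then s.total + s.sp
  else match s.mn with
    | some mn => if s.mp.getD 0 + mn > 0 then s.total + s.sp + mn
                 else s.total + s.sp - s.mp.getD 0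
    | none => s.total + s.sp - s.mp.getD 0

-- ===== PRECONDITION & SPEC =====
def Spec_maximumValueSum (nums : List Int) (k : Int) (edges : List (List Int)) (out : Int) : Prop := out = maximumValueSum_alt nums k edges
instance (nums : List Int) (k : Int) (edges : List (List Int)) (out : Int) : Decidable (Spec_maximumValueSum nums k edges out) := by unfold Spec_maximumValueSum; infer_instance

-- ===== CLAIM (what is proved, stated in full; the proofs are below) =====
def Claim_equal_maximumValueSum : Prop := ∀ (nums : List Int) (k : Int) (edges : List (List Int)), Dom_maximumValueSum nums k edges → Spec_maximumValueSum nums k edges (maximumValueSum nums k edges)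

-- ===== LEMMAS AND PROOFS =====

def pvDelta (k v : Int) : Int := PySem.Int.bxor v k - v

def optMin : Option Int → Option Int → Option Int
  | none, b => b
  | a, none => a
  | some x, some y => some (min x y)

def optMax : Option Int → Option Int → Option Int
  | none, b => b
  | a, none => a
  | some x, some y => some (max x y)

def sumPos : List Int → Int
  | [] => 0
  | d :: t => (if 0 < d then d else 0) + sumPos t

def parityPos : List Int → Bool
  | [] => false
  | d :: t => if 0 < d then !(parityPos t) else parityPos t

def minPos : List Int → Option Int
  | [] => none
  | d :: t => if 0 < d then optMin (some d) (minPos t) else minPos t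

def maxNP : List Int → Option Int
  | [] => none
  | d :: t => if 0 < d then maxNP t else optMax (some d) (maxNP t)

lemma optMin_none_right (a : Option Int) : optMin a none = a := by cases a <;> rfl
lemma optMax_none_right (a : Option Int) : optMax a none = a := by cases a <;> rfl

lemma optMin_assoc (a b c : Option Int) : optMin (optMin a b) c = optMin a (optMin b c) := by
  cases a <;> cases b <;> cases c <;> simp [optMin, min_assoc]

lemma optMax_assoc (a b c : Option Int) : optMax (optMax a b) c = optMax a (optMax b c) := by
  cases a <;> cases b <;> cases c <;> simp [optMax, max_assoc]

lemma optMin_comm (a b : Option Int) : optMin a b = optMin b a := by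
  cases a <;> cases b <;> simp [optMin, min_comm]

lemma optMax_comm (a b : Option Int) : optMax a b = optMax b a := by
  cases a <;> cases b <;> simp [optMax, max_comm]

lemma optMin_left_comm (a b c : Option Int) : optMin a (optMin b c) = optMin b (optMin a c) := by
  rw [← optMin_assoc, optMin_comm a b, optMin_assoc]

lemma optMax_left_comm (a b c : Option Int) : optMax a (optMax b c) = optMax b (optMax a c) := by
  rw [← optMax_assoc, optMax_comm a b, optMax_assoc]

lemma pvStep_pos (k : Int) (s : PvSt) (v : Int) (h : 0 < pvDelta k v) :
    pvStep k s v = ⟨s.total + v, s.sp + pvDelta k v, !s.odd, optMin s.mp (some (pvDelta k v)), s.mn⟩ := by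
  unfold pvDelta at *
  simp only [pvStep]
  rw [if_pos h]
  congr 1
  cases s.mp with
  | none => rfl
  | some m =>
      simp only [optMin]
      split_ifs with hd
      · rw [min_eq_right hd.le]
      · rw [min_eq_left (by omega)]

lemma pvStep_nonpos (k : Int) (s : PvSt) (v : Int) (h : ¬ 0 < pvDelta k v) :
    pvStep k s v = ⟨s.total + v, s.sp, s.odd, s.mp, optMax s.mn (some (pvDelta k v))⟩ := by
  unfold pvDelta at *
  simp only [pvStep]
  rw [if_neg h]
  congr 1
  cases s.mn with
  | none => rfl
  | some m =>
      simp only [optMax]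
      split_ifs with hd
      · rw [max_eq_right hd.le]
      · rw [max_eq_left (by omega)]

lemma foldl_char (k : Int) (nums : List Int) (s : PvSt) :
    nums.foldl (pvStep k) s =
      { total := s.total + nums.sum,
        sp := s.sp + sumPos (nums.map (pvDelta k)),
        odd := xor s.odd (parityPos (nums.map (pvDelta k))),
        mp := optMin s.mp (minPos (nums.map (pvDelta k))),
        mn := optMax s.mn (maxNP (nums.map (pvDelta k))) } := by
  induction nums generalizing s with
  | nil =>
      simp [sumPos, parityPos, minPos, maxNP, optMin_none_right, optMax_none_right]
  | cons v t ih =>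
      rw [List.foldl_cons]
      by_cases h : 0 < pvDelta k v
      · rw [pvStep_pos k s v h, ih]
        simp only [List.map_cons, List.sum_cons, sumPos, parityPos, minPos, maxNP,
          if_pos h, PvSt.mk.injEq]
        and_intros <;>
          first
            | ring
            | trivial
            | exact optMin_assoc ..
            | (cases s.odd <;> cases parityPos (t.map (pvDelta k)) <;> rfl)
      · rw [pvStep_nonpos k s v h, ih]
        simp only [List.map_cons, List.sum_cons, sumPos, parityPos, minPos, maxNP,
          if_neg h, PvSt.mk.injEq]
        and_intros <;> first | ring | trivial | exact optMax_assoc ..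

-- permutation invariance of the four summaries
lemma sumPos_perm {l₁ l₂ : List Int} (h : l₁.Perm l₂) : sumPos l₁ = sumPos l₂ := by
  induction h with
  | nil => rfl
  | cons x _ ih => simp [sumPos, ih]
  | swap x y t => simp only [sumPos]; ring
  | trans _ _ ih1 ih2 => exact ih1.trans ih2

lemma parityPos_perm {l₁ l₂ : List Int} (h : l₁.Perm l₂) : parityPos l₁ = parityPos l₂ := by
  induction h with
  | nil => rfl
  | cons x _ ih => simp [parityPos, ih]
  | swap x y t => simp only [parityPos]; split_ifs <;> simp
  | trans _ _ ih1 ih2 => exact ih1.trans ih2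

lemma minPos_perm {l₁ l₂ : List Int} (h : l₁.Perm l₂) : minPos l₁ = minPos l₂ := by
  induction h with
  | nil => rfl
  | cons x _ ih => simp [minPos, ih]
  | swap x y t => simp only [minPos]; split_ifs <;> simp [optMin_left_comm]
  | trans _ _ ih1 ih2 => exact ih1.trans ih2

lemma maxNP_perm {l₁ l₂ : List Int} (h : l₁.Perm l₂) : maxNP l₁ = maxNP l₂ := by
  induction h with
  | nil => rfl
  | cons x _ ih => simp [maxNP, ih]
  | swap x y t => simp only [maxNP]; split_ifs <;> simp [optMax_left_comm]
  | trans _ _ ih1 ih2 => exact ih1.trans ih2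

-- facts about all-nonpositive lists
lemma allNonpos_facts {t : List Int} (h : ∀ a ∈ t, a ≤ 0) :
    sumPos t = 0 ∧ parityPos t = false ∧ minPos t = none := by
  induction t with
  | nil => exact ⟨rfl, rfl, rfl⟩
  | cons d t ih =>
      have hd : d ≤ 0 := h d (by simp)
      have ih' := ih (fun a ha => h a (by simp [ha]))
      simp [sumPos, parityPos, minPos, show ¬ 0 < d by omega, ih'.1, ih'.2.1, ih'.2.2]

lemma maxNP_mem {t : List Int} {M : Int} (h : maxNP t = some M) : M ∈ t := by
  induction t with
  | nil => simp [maxNP] at h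
  | cons d t ih =>
      simp only [maxNP] at h
      split_ifs at h with hd
      · exact List.mem_cons_of_mem _ (ih h)
      · cases hm : maxNP t with
        | none => rw [hm] at h; simp [optMax] at h; simp [h]
        | some m =>
            rw [hm] at h; simp [optMax] at h
            by_cases hc : m ≤ d
            · simp [max_eq_left hc] at h; simp [h]
            · simp [max_eq_right (by omega : (d:Int) ≤ m)] at h
              exact List.mem_cons_of_mem _ (ih (h ▸ hm))

lemma minPos_mem {t : List Int} {m : Int} (h : minPos t = some m) : m ∈ t := by
  induction t with
  | nil => simp [minPos] at h
  | cons d t ih =>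
      simp only [minPos] at h
      split_ifs at h with hd
      · cases hm : minPos t with
        | none => rw [hm] at h; simp [optMin] at h; simp [h]
        | some m' =>
            rw [hm] at h; simp [optMin] at h
            by_cases hc : d ≤ m'
            · simp [min_eq_left hc] at h; simp [h]
            · simp [min_eq_right (by omega : (m':Int) ≤ d)] at h
              exact List.mem_cons_of_mem _ (ih (h ▸ hm))
      · exact List.mem_cons_of_mem _ (ih h)

lemma minPos_none_parity {t : List Int} (h : minPos t = none) : parityPos t = false := by
  induction t with
  | nil => rfl
  | cons d t ih =>
      simp only [minPos, parityPos] at *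
      split_ifs at h ⊢ with hd
      · exfalso
        cases hm : minPos t <;> rw [hm] at h <;> simp [optMin] at h
      · exact ih h

-- the closed form computed by B, as a function of the summaries
def pvG (l : List Int) : Int :=
  if parityPos l = false then sumPos l
  else match maxNP l with
    | some m => if (minPos l).getD 0 + m > 0 then sumPos l + m else sumPos l - (minPos l).getD 0
    | none => sumPos l - (minPos l).getD 0

lemma pvLoopA_eq_pvG : ∀ l : List Int, l.Pairwise (fun a b => b ≤ a) → pvLoopA l = pvG l := by
  intro l hl
  induction l using pvLoopA.induct with
  | case1 => rfl
  | case2 x =>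
      by_cases hx : 0 < x
      · simp [pvLoopA, pvG, sumPos, parityPos, minPos, maxNP, hx, optMin]
      · simp [pvLoopA, pvG, sumPos, parityPos, minPos, maxNP, hx]
  | case3 x y rest hxy =>
      -- x + y ≤ 0 : loop returns 0
      rcases List.pairwise_cons.mp hl with ⟨hx_all, hl'⟩
      rcases List.pairwise_cons.mp hl' with ⟨hy_all, hrest⟩
      have hyx : y ≤ x := hx_all y (by simp)
      have hy0 : y ≤ 0 := by omega
      have hrnp : ∀ a ∈ rest, a ≤ 0 := fun a ha => le_trans (hy_all a ha) hy0
      obtain ⟨hs0, hp0, hm0⟩ := allNonpos_facts hrnp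
      by_cases hx : 0 < x
      · -- x positive, y the best nonpositive, x+y ≤ 0 → drop x
        have hmn : optMax (some y) (maxNP rest) = some y := by
          cases hM : maxNP rest with
          | none => rfl
          | some M =>
              have := hrnp M (maxNP_mem hM)
              have hMy : M ≤ y := hy_all M (maxNP_mem hM)
              simp [optMax, max_eq_left hMy]
        simp only [pvLoopA, if_pos hxy, pvG, sumPos, parityPos, minPos, maxNP,
          if_pos hx, show ¬ 0 < y by omega, if_neg (show ¬ 0 < y by omega),
          hs0, hp0, hm0, hmn, optMin_none_right]
        simp [optMin, show ¬ (x + y > 0) by omega]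
      · have hx0 : x ≤ 0 := by omega
        simp [pvLoopA, if_pos hxy, pvG, sumPos, parityPos, minPos, maxNP,
          hx, show ¬ 0 < y by omega, hs0, hp0, hm0]
  | case4 x y rest hxy ih =>
      rcases List.pairwise_cons.mp hl with ⟨hx_all, hl'⟩
      rcases List.pairwise_cons.mp hl' with ⟨hy_all, hrest⟩
      have hyx : y ≤ x := hx_all y (by simp)
      have ihr := ih hrest
      by_cases hy : 0 < y
      · -- both positive: pair contributes x+y, recurse
        have hx : 0 < x := by omega
        simp only [pvLoopA, if_neg hxy, ihr, pvG, sumPos, parityPos, minPos, maxNP,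
          if_pos hx, if_pos hy]
        cases hp : parityPos rest with
        | false => simp; ring
        | true =>
            have hmr : ∃ m, minPos rest = some m := by
              cases hm : minPos rest with
              | none => rw [minPos_none_parity hm] at hp; exact absurd hp (by simp)
              | some m => exact ⟨m, rfl⟩
            obtain ⟨m, hm⟩ := hmr
            have hmy : m ≤ y := hy_all m (minPos_mem hm)
            have hcoll : optMin (some x) (optMin (some y) (minPos rest)) = some m := by
              rw [hm]
              simp [optMin, min_eq_right hmy, min_eq_right (le_trans hmy hyx)]
            rw [hcoll, hm]
            simp only [Bool.not_true, Bool.not_false]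
            cases hM : maxNP rest with
            | none => simp; ring
            | some M =>
                simp only [Option.getD_some]
                by_cases hc : m + M > 0 <;> simp [hc] <;> ring
      · -- y ≤ 0 < x, x + y > 0 : take x+y and stop
        have hx : 0 < x := by omega
        have hrnp : ∀ a ∈ rest, a ≤ 0 := fun a ha => le_trans (hy_all a ha) (by omega)
        obtain ⟨hs0, hp0, hm0⟩ := allNonpos_facts hrnp
        have hloop0 : pvLoopA rest = 0 := by
          rw [ihr]; simp [pvG, hs0, hp0]
        have hmn : optMax (some y) (maxNP rest) = some y := by
          cases hM : maxNP rest with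
          | none => rfl
          | some M =>
              have hMy : M ≤ y := hy_all M (maxNP_mem hM)
              simp [optMax, max_eq_left hMy]
        simp only [pvLoopA, if_neg hxy, hloop0, pvG, sumPos, parityPos, minPos, maxNP,
          if_pos hx, if_neg hy, hs0, hp0, hm0, hmn, optMin_none_right]
        simp [optMin, show x + y > 0 by omega]

lemma alt_eq (nums : List Int) (k : Int) (edges : List (List Int)) :
    maximumValueSum_alt nums k edges = nums.sum + pvG (nums.map (pvDelta k)) := by
  simp only [maximumValueSum_alt, foldl_char, Bool.false_xor, pvG]
  have h1 : optMin none (minPos (nums.map (pvDelta k))) = minPos (nums.map (pvDelta k)) := rfl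
  have h2 : optMax none (maxNP (nums.map (pvDelta k))) = maxNP (nums.map (pvDelta k)) := rfl
  simp only [h1, h2, zero_add]
  cases parityPos (nums.map (pvDelta k)) with
  | false => simp
  | true =>
      simp only [Bool.true_eq_false, if_neg (by simp : ¬ (True = False))]
      cases maxNP (nums.map (pvDelta k)) with
      | none => simp; ring
      | some m =>
          by_cases hc : (minPos (nums.map (pvDelta k))).getD 0 + m > 0 <;> simp [hc] <;> ring

-- ===== VERDICT (by name: the statement is the Claim_ definition above) =====
theorem maximumValueSum_spec : Claim_equal_maximumValueSum := by
  intro nums k edges _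
  unfold Spec_maximumValueSum
  have ha : maximumValueSum nums k edges
      = nums.sum + pvLoopA (PySem.List.sorted (nums.map (pvDelta k)) (fun x => x) true) := rfl
  rw [ha, alt_eq]
  have hperm : (PySem.List.sorted (nums.map (pvDelta k)) (fun x => x) true).Perm (nums.map (pvDelta k)) :=
    PySem.List.sorted_perm (nums.map (pvDelta k)) (fun x => x) true
  have hpw : (PySem.List.sorted (nums.map (pvDelta k)) (fun x => x) true).Pairwise (fun a b => b ≤ a) :=
    PySem.List.sorted_pairwise_rev (nums.map (pvDelta k)) (fun x => x)
  rw [pvLoopA_eq_pvG _ hpw]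
  unfold pvG
  rw [sumPos_perm hperm, parityPos_perm hperm, minPos_perm hperm, maxNP_perm hperm]
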